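-- pv_equiv track=rewrite | github.com/AviParrack/Soothcheck | ntml_efficient_scripts/data_loading.py | _find_assistant_token_boundaries
-- ===== SOURCE A (Python) =====
-- from typing import List, Dict, Tuple, Optional, Union
--
-- def _find_assistant_token_boundaries(full_text: str, offset_mapping: List[Tuple[int, int]]) -> Tuple[Optional[int], Optional[int]]:
--     """Find token indices that correspond to assistant response."""
--
--     # Find assistant response in character space
--     assistant_marker = "<|start_header_id|>assistant<|end_header_id|>"
--     eot_marker = "<|eot_id|>"
--
--     assistant_char_start = full_text.find(assistant_marker)
--     if assistant_char_start == -1: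
--         return None, None
--
--     # Start after the header
--     assistant_content_start = assistant_char_start + len(assistant_marker)
--
--     # Find end of assistant response
--     eot_pos = full_text.find(eot_marker, assistant_content_start)
--     if eot_pos == -1:
--         assistant_content_end = len(full_text)
--     else:
--         assistant_content_end = eot_pos
--
--     # Convert to token indices
--     assistant_start_token = None
--     assistant_end_token = None
--
--     for token_idx, (char_start, char_end) in enumerate(offset_mapping):
--         # Skip special tokens (offset_mapping is (0,0) for special tokens)
--         if char_start == 0 and char_end == 0:
--             continue
--
--         # Find first token that starts in or after assistant content
--         if assistant_start_token is None and char_start >= assistant_content_start: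
--             assistant_start_token = token_idx
--
--         # Find first token that ends after assistant content
--         if assistant_end_token is None and char_end >= assistant_content_end:
--             assistant_end_token = token_idx
--             break
--
--     # If we didn't find end, use end of sequence
--     if assistant_end_token is None:
--         assistant_end_token = len(offset_mapping)
--
--     return assistant_start_token, assistant_end_token
-- ===== SOURCE B (Python) =====
-- from typing import List, Tuple, Optional
--
-- def _find_assistant_token_boundaries(full_text: str, offset_mapping: List[Tuple[int, int]]) -> Tuple[Optional[int], Optional[int]]:
--     """Find token indices that correspond to assistant response (two-pass version)."""
--     assistant_marker = "<|start_header_id|>assistant<|end_header_id|>"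
--     eot_marker = "<|eot_id|>"
--
--     p = full_text.find(assistant_marker)
--     if p == -1:
--         return None, None
--     content_start = p + len(assistant_marker)
--
--     q = full_text.find(eot_marker, content_start)
--     content_end = len(full_text) if q == -1 else q
--
--     # Pass 1: first non-special token whose span ends at/after the content end.
--     end_idx = next(
--         (i for i, (a, b) in enumerate(offset_mapping)
--          if (a, b) != (0, 0) and b >= content_end),
--         len(offset_mapping),
--     )
--
--     # Pass 2: first non-special token (up to and including end_idx) that
--     # starts at/after the content start.
--     start_idx = next(
--         (i for i, (a, b) in enumerate(offset_mapping[: end_idx + 1])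
--          if (a, b) != (0, 0) and a >= content_start),
--         None,
--     )
--     return start_idx, end_idx
-- ===== Notes on version B (the rewrite author's own statement) =====
-- stated objective: simpler
-- what changed: Replaces the single stateful scan with two-option accumulator and break by two independent first-match passes (find end index first, then search for the start only among tokens up to that index).
import Mathlib
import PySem

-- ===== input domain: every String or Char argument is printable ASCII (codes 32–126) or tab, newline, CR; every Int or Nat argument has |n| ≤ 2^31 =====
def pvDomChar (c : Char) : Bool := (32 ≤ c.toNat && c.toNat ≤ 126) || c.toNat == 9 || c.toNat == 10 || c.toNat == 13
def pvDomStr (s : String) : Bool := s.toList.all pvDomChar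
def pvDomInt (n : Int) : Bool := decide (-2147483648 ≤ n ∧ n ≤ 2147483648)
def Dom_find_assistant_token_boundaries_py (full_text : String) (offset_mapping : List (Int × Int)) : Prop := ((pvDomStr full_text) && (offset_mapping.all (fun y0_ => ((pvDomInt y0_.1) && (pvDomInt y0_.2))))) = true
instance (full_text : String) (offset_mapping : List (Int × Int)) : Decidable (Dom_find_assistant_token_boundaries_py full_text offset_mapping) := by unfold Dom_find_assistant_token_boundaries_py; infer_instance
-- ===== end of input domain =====

-- B replaces A's single stateful scan-with-break by two independent first-match passes
-- (find the end index first, then search for the start among tokens up to it): simpler decomposition.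


-- ===== PORT A =====
-- A's for-loop with two optional accumulators and a break at the end token.
def pvLoopA (cstart cend : Int) (idx : Int) (xs : List (Int × Int)) (s : Option Int) :
    Option Int × Option Int :=
  match xs with
  | [] => (s, none)
  | (cs, ce) :: rest =>
    if cs = 0 ∧ ce = 0 then pvLoopA cstart cend (idx + 1) rest s
    else
      let s' := if s = none ∧ cs ≥ cstart then some idx else s
      if ce ≥ cend then (s', some idx)
      else pvLoopA cstart cend (idx + 1) rest s'

def find_assistant_token_boundaries_py (full_text : String) (offset_mapping : List (Int × Int)) : Option Int × Option Int :=
  let assistant_marker := "<|start_header_id|>assistant<|end_header_id|>"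
  let eot_marker := "<|eot_id|>"
  let assistant_char_start := PySem.Str.find full_text assistant_marker
  if assistant_char_start = -1 then (none, none)
  else
    let assistant_content_start := assistant_char_start + PySem.Str.len assistant_marker
    let eot_pos := PySem.Str.findFrom full_text eot_marker assistant_content_start
    let assistant_content_end := if eot_pos = -1 then PySem.Str.len full_text else eot_pos
    let r := pvLoopA assistant_content_start assistant_content_end 0 offset_mapping none
    (r.1, some (r.2.getD (PySem.List.len offset_mapping)))

-- ===== PORT B =====
-- first non-special token with char_end ≥ cend (the 'next' over enumerate in Source B)
def pvFindEnd (cend : Int) (idx : Int) (xs : List (Int × Int)) : Option Int :=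
  match xs with
  | [] => none
  | (cs, ce) :: rest =>
    if ¬(cs = 0 ∧ ce = 0) ∧ ce ≥ cend then some idx else pvFindEnd cend (idx + 1) rest

-- first non-special token with char_start ≥ cstart (the second 'next' in Source B)
def pvFindStart (cstart : Int) (idx : Int) (xs : List (Int × Int)) : Option Int :=
  match xs with
  | [] => none
  | (cs, ce) :: rest =>
    if ¬(cs = 0 ∧ ce = 0) ∧ cs ≥ cstart then some idx else pvFindStart cstart (idx + 1) rest

def find_assistant_token_boundaries_py_alt (full_text : String) (offset_mapping : List (Int × Int)) : Option Int × Option Int :=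
  let assistant_marker := "<|start_header_id|>assistant<|end_header_id|>"
  let eot_marker := "<|eot_id|>"
  let p := PySem.Str.find full_text assistant_marker
  if p = -1 then (none, none)
  else
    let content_start := p + PySem.Str.len assistant_marker
    let q := PySem.Str.findFrom full_text eot_marker content_start
    let content_end := if q = -1 then PySem.Str.len full_text else q
    let end_idx := (pvFindEnd content_end 0 offset_mapping).getD (PySem.List.len offset_mapping)
    let start_idx := pvFindStart content_start 0 (PySem.List.slice offset_mapping none (some (end_idx + 1)))
    (start_idx, some end_idx)

-- ===== PRECONDITION & SPEC =====
def Spec_find_assistant_token_boundaries_py (full_text : String) (offset_mapping : List (Int × Int)) (out : Option Int × Option Int) : Prop := out = find_assistant_token_boundaries_py_alt full_text offset_mapping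
instance (full_text : String) (offset_mapping : List (Int × Int)) (out : Option Int × Option Int) : Decidable (Spec_find_assistant_token_boundaries_py full_text offset_mapping out) := by unfold Spec_find_assistant_token_boundaries_py; infer_instance

-- ===== CLAIM (what is proved, stated in full; the proofs are below) =====
def Claim_equal_find_assistant_token_boundaries_py : Prop := ∀ (full_text : String) (offset_mapping : List (Int × Int)), Dom_find_assistant_token_boundaries_py full_text offset_mapping → Spec_find_assistant_token_boundaries_py full_text offset_mapping (find_assistant_token_boundaries_py full_text offset_mapping)

-- ===== LEMMAS AND PROOFS =====

theorem pvFindEnd_ge (cend : Int) :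
    ∀ (xs : List (Int × Int)) (idx e : Int), pvFindEnd cend idx xs = some e → idx ≤ e := by
  intro xs
  induction xs with
  | nil => intro idx e h; simp [pvFindEnd] at h
  | cons hd tl ih =>
    intro idx e h
    obtain ⟨cs, ce⟩ := hd
    simp only [pvFindEnd] at h
    split_ifs at h with hc
    · simp only [Option.some.injEq] at h; omega
    · have := ih (idx + 1) e h; omega

theorem pvLoopA_eq (cstart cend : Int) :
    ∀ (xs : List (Int × Int)) (idx : Int) (s : Option Int),
      pvLoopA cstart cend idx xs s =
        match pvFindEnd cend idx xs with
        | some e => (s.orElse (fun _ => pvFindStart cstart idx (xs.take (e - idx + 1).toNat)), some e)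
        | none => (s.orElse (fun _ => pvFindStart cstart idx xs), none) := by
  intro xs
  induction xs with
  | nil => intro idx s; simp [pvLoopA, pvFindEnd, pvFindStart]
  | cons hd tl ih =>
    intro idx s
    obtain ⟨cs, ce⟩ := hd
    by_cases hsp : cs = 0 ∧ ce = 0
    · -- special token: all three skip it
      have hnot : ¬(¬(cs = 0 ∧ ce = 0) ∧ ce ≥ cend) := by tauto
      simp only [pvLoopA, pvFindEnd, if_pos hsp, if_neg hnot]
      rw [ih (idx + 1) s]
      cases he : pvFindEnd cend (idx + 1) tl with
      | none =>
        dsimp only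
        simp only [pvFindStart]
        have hnot2 : ¬(¬(cs = 0 ∧ ce = 0) ∧ cs ≥ cstart) := by tauto
        rw [if_neg hnot2]
      | some e =>
        have hge : idx + 1 ≤ e := pvFindEnd_ge cend tl (idx + 1) e he
        have ht : (e - idx + 1).toNat = (e - (idx + 1) + 1).toNat + 1 := by omega
        dsimp only
        rw [ht]
        simp only [List.take_succ_cons, pvFindStart]
        have hnot2 : ¬(¬(cs = 0 ∧ ce = 0) ∧ cs ≥ cstart) := by tauto
        rw [if_neg hnot2]
    · -- real token
      have hs' : (if s = none ∧ cs ≥ cstart then some idx else s) =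
          s.orElse (fun _ => if ¬(cs = 0 ∧ ce = 0) ∧ cs ≥ cstart then some idx else none) := by
        cases s with
        | none => by_cases h2 : cs ≥ cstart <;> simp [h2, hsp]
        | some v => simp
      by_cases hend : ce ≥ cend
      · have hyes : (¬(cs = 0 ∧ ce = 0) ∧ ce ≥ cend) := ⟨hsp, hend⟩
        simp only [pvLoopA, pvFindEnd, if_neg hsp, if_pos hyes, if_pos hend]
        have ht : (idx - idx + 1).toNat = 1 := by omega
        rw [ht]
        simp only [List.take_succ_cons, List.take_zero, pvFindStart]
        rw [hs']
      · have hno : ¬(¬(cs = 0 ∧ ce = 0) ∧ ce ≥ cend) := by tauto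
        simp only [pvLoopA, pvFindEnd, if_neg hsp, if_neg hno, if_neg hend]
        rw [ih (idx + 1), hs']
        cases he : pvFindEnd cend (idx + 1) tl with
        | none =>
          dsimp only
          simp only [pvFindStart]
          cases s with
          | none =>
            by_cases h2 : cs ≥ cstart
            · simp [h2, hsp]
            · have hn : ¬(¬(cs = 0 ∧ ce = 0) ∧ cs ≥ cstart) := by tauto
              simp [h2]
          | some v => simp
        | some e =>
          have hge : idx + 1 ≤ e := pvFindEnd_ge cend tl (idx + 1) e he
          have ht : (e - idx + 1).toNat = (e - (idx + 1) + 1).toNat + 1 := by omega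
          dsimp only
          rw [ht]
          simp only [List.take_succ_cons, pvFindStart]
          cases s with
          | none =>
            by_cases h2 : cs ≥ cstart
            · simp [h2, hsp]
            · have hn : ¬(¬(cs = 0 ∧ ce = 0) ∧ cs ≥ cstart) := by tauto
              simp [h2]
          | some v => simp

theorem pvSlice_to_nonneg (xs : List (Int × Int)) (b : Int) (hb : 0 ≤ b) :
    PySem.List.slice xs none (some b) = xs.take b.toNat := by
  have : b = ((b.toNat : Nat) : Int) := by omega
  rw [this, PySem.List.slice_to_natCast]
  simp only [List.take_eq_take_iff]
  omega

-- ===== VERDICT (by name: the statement is the Claim_ definition above) =====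
theorem find_assistant_token_boundaries_py_spec : Claim_equal_find_assistant_token_boundaries_py := by
  unfold Claim_equal_find_assistant_token_boundaries_py
  intro full_text offset_mapping _
  unfold Spec_find_assistant_token_boundaries_py
  unfold find_assistant_token_boundaries_py find_assistant_token_boundaries_py_alt
  simp only []
  by_cases hp : PySem.Str.find full_text "<|start_header_id|>assistant<|end_header_id|>" = -1
  · simp only [if_pos hp]
  · rw [if_neg hp, if_neg hp]
    set cstart := PySem.Str.find full_text "<|start_header_id|>assistant<|end_header_id|>" +
      PySem.Str.len "<|start_header_id|>assistant<|end_header_id|>" with hcs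
    set q := PySem.Str.findFrom full_text "<|eot_id|>" cstart with hq
    set cend := if q = -1 then PySem.Str.len full_text else q with hce
    rw [pvLoopA_eq cstart cend offset_mapping 0 none]
    cases he : pvFindEnd cend 0 offset_mapping with
    | some e =>
      have hge : (0 : Int) ≤ e := pvFindEnd_ge cend offset_mapping 0 e he
      simp only [Option.getD_some]
      rw [pvSlice_to_nonneg offset_mapping (e + 1) (by omega)]
      have h1 : (e - 0 + 1).toNat = (e + 1).toNat := by omega
      rw [h1]
      simp [Option.orElse]
    | none =>
      simp only [Option.getD_none]
      rw [pvSlice_to_nonneg offset_mapping (PySem.List.len offset_mapping + 1)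
        (by simp [PySem.List.len_eq]; positivity)]
      have h2 : offset_mapping.take (PySem.List.len offset_mapping + 1).toNat = offset_mapping := by
        apply List.take_of_length_le; simp [PySem.List.len_eq]
      rw [h2]
      simp [Option.orElse]
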